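-- pv_equiv track=rewrite | github.com/radiomicsgroup/dMRIMC | parameter_estimation/sp_funcs.py | config_param_dictionary
-- ===== SOURCE A (Python) =====
-- def config_param_dictionary(config_range):
--     """
--     Create a dictionary with the config number as the keys and the contained
--     parameters as values
--
--     Returns
--     -------
--     my_dict : dictionary
--         Dictionary containing the included metrics
--
--
--     Parameters
--     ----------
--     config_range : int
--         Up to what configuration to go, best to go 13
--
--
--     """
--     my_dict = {}
--     for param_config in range(1, config_range + 1):
--         param_config = str(param_config)
--         if param_config == "9":
--             # Parameters are ICVF, VCS, D0_intra, D0_extra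
--             included_metrics = ['ICVF', 'vCS', 'D0_intra', 'D0_extra']
--             my_dict.update({param_config: included_metrics})
--         elif param_config == "13":
--             # Parameters are ICVF, mean diameter, var of diameter, skew of diameter, D0_intra, D0_extra
--             included_metrics = ['ICVF', "Diam_Mean",
--                                 "Variance", "Skew", "D0_intra", "D0_extra"]
--             my_dict.update({param_config: included_metrics})
--     return my_dict
-- ===== SOURCE B (Python) =====
-- def config_param_dictionary(config_range):
--     """Build the config->parameters dict directly from the two thresholds
--     (9 and 13) instead of scanning every config number."""
--     my_dict = {}
--     if config_range >= 9:
--         my_dict["9"] = ['ICVF', 'vCS', 'D0_intra', 'D0_extra']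
--     if config_range >= 13:
--         my_dict["13"] = ['ICVF', "Diam_Mean", "Variance", "Skew",
--                          "D0_intra", "D0_extra"]
--     return my_dict
-- ===== Notes on version B (the rewrite author's own statement) =====
-- stated objective: faster
-- what changed: Replaced the loop over range(1, config_range+1) with str() comparisons by two direct threshold checks (config_range >= 9, >= 13) that insert the keys '9' and '13' in order.
import Mathlib
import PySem

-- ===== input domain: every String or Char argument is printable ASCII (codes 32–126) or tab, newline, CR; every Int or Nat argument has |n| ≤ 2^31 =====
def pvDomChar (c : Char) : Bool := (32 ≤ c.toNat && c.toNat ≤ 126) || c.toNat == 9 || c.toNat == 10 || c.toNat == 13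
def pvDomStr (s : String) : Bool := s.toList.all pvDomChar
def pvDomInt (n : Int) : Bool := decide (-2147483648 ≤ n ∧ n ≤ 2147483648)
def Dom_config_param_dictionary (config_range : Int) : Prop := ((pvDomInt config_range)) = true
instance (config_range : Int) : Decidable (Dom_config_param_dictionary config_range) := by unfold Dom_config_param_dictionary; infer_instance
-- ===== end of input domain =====

-- B replaces A's O(n) scan of range(1, config_range+1) by two O(1) threshold checks.

-- ===== PORT A =====
def config_param_dictionary (config_range : Int) : List (String × List String) :=
  ((PySem.List.pyRange 1 (config_range + 1) 1).foldl
    (fun (d : PySem.Dict String (List String)) k =>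
      let s := PySem.Int.toStr k
      if s == "9" then d.insert s ["ICVF", "vCS", "D0_intra", "D0_extra"]
      else if s == "13" then
        d.insert s ["ICVF", "Diam_Mean", "Variance", "Skew", "D0_intra", "D0_extra"]
      else d)
    PySem.Dict.empty).items

-- ===== PORT B =====
def config_param_dictionary_alt (config_range : Int) : List (String × List String) :=
  let d0 : PySem.Dict String (List String) := PySem.Dict.empty
  let d1 := if 9 ≤ config_range then d0.insert "9" ["ICVF", "vCS", "D0_intra", "D0_extra"] else d0
  let d2 := if 13 ≤ config_range then
      d1.insert "13" ["ICVF", "Diam_Mean", "Variance", "Skew", "D0_intra", "D0_extra"] else d1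
  d2.items

-- ===== PRECONDITION & SPEC =====
def Spec_config_param_dictionary (config_range : Int) (out : List (String × List String)) : Prop := out = config_param_dictionary_alt config_range
instance (config_range : Int) (out : List (String × List String)) : Decidable (Spec_config_param_dictionary config_range out) := by unfold Spec_config_param_dictionary; infer_instance

-- ===== CLAIM (what is proved, stated in full; the proofs are below) =====
def Claim_equal_config_param_dictionary : Prop := ∀ (config_range : Int), Dom_config_param_dictionary config_range → Spec_config_param_dictionary config_range (config_param_dictionary config_range)

-- ===== LEMMAS AND PROOFS =====

-- A's loop body, named for the proofs.
def pvStep (d : PySem.Dict String (List String)) (k : Int) : PySem.Dict String (List String) :=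
  let s := PySem.Int.toStr k
  if s == "9" then d.insert s ["ICVF", "vCS", "D0_intra", "D0_extra"]
  else if s == "13" then
    d.insert s ["ICVF", "Diam_Mean", "Variance", "Skew", "D0_intra", "D0_extra"]
  else d

-- B's result as a Dict, named for the proofs.
def pvTarget (n : Int) : PySem.Dict String (List String) :=
  let d0 : PySem.Dict String (List String) := PySem.Dict.empty
  let d1 := if 9 ≤ n then d0.insert "9" ["ICVF", "vCS", "D0_intra", "D0_extra"] else d0
  if 13 ≤ n then d1.insert "13" ["ICVF", "Diam_Mean", "Variance", "Skew", "D0_intra", "D0_extra"] else d1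

lemma tdc_succ (b fuel n : Nat) (ds : List Char) :
    Nat.toDigitsCore b (fuel + 1) n ds =
      if n / b = 0 then (n % b).digitChar :: ds
      else Nat.toDigitsCore b fuel (n / b) ((n % b).digitChar :: ds) := by
  simp [Nat.toDigitsCore]

lemma tdc_len (b : Nat) : ∀ (fuel n : Nat) (ds : List Char), 1 ≤ fuel →
    ds.length + 1 ≤ (Nat.toDigitsCore b fuel n ds).length := by
  intro fuel
  induction fuel with
  | zero => intro n ds h; omega
  | succ f ih =>
    intro n ds _
    rw [tdc_succ]
    split
    · simp
    · rcases Nat.eq_zero_or_pos f with hf | hf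
      · subst hf; simp [Nat.toDigitsCore]
      · have := ih (n / b) ((n % b).digitChar :: ds) hf
        simp at this ⊢
        omega

lemma toDigits_small (m : Nat) (h : m < 10) : Nat.toDigits 10 m = [Nat.digitChar m] := by
  unfold Nat.toDigits
  rw [tdc_succ]
  have h1 : m / 10 = 0 := Nat.div_eq_of_lt h
  have h2 : m % 10 = m := Nat.mod_eq_of_lt h
  simp [h1, h2]

lemma toDigits_two (m : Nat) (h10 : 10 ≤ m) (h100 : m < 100) :
    Nat.toDigits 10 m = [Nat.digitChar (m / 10), Nat.digitChar (m % 10)] := by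
  unfold Nat.toDigits
  obtain ⟨f, hf⟩ : ∃ f, m + 1 = f + 2 := ⟨m - 1, by omega⟩
  rw [hf, tdc_succ]
  have hne : ¬ m / 10 = 0 := by omega
  rw [if_neg hne, tdc_succ]
  have h1 : m / 10 / 10 = 0 := by omega
  have h2 : m / 10 % 10 = m / 10 := Nat.mod_eq_of_lt (by omega)
  simp [h1, h2]

lemma toDigitsQ_len2 (m : Nat) (h : 10 ≤ m) : 2 ≤ (Nat.toDigits 10 m).length := by
  unfold Nat.toDigits
  obtain ⟨f, hf⟩ : ∃ f, m + 1 = f + 1 := ⟨m, rfl⟩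
  rw [hf, tdc_succ]
  have hne : ¬ m / 10 = 0 := by omega
  rw [if_neg hne]
  have := tdc_len 10 f (m / 10) [(m % 10).digitChar] (by omega)
  simpa using this

lemma toDigits_len3 (m : Nat) (h : 100 ≤ m) : 3 ≤ (Nat.toDigits 10 m).length := by
  unfold Nat.toDigits
  obtain ⟨f, hf⟩ : ∃ f, m + 1 = f + 2 := ⟨m - 1, by omega⟩
  rw [hf, tdc_succ]
  have hne : ¬ m / 10 = 0 := by omega
  rw [if_neg hne, tdc_succ]
  have hne2 : ¬ m / 10 / 10 = 0 := by omega
  rw [if_neg hne2]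
  have := tdc_len 10 f (m / 10 / 10) [(m / 10 % 10).digitChar, (m % 10).digitChar] (by omega)
  simpa using this

lemma digitChar_eq_nine (x : Nat) (hx : x < 10) : Nat.digitChar x = '9' ↔ x = 9 := by
  interval_cases x <;> simp [Nat.digitChar]

lemma digitChar_eq_one (x : Nat) (hx : x < 10) : Nat.digitChar x = '1' ↔ x = 1 := by
  interval_cases x <;> simp [Nat.digitChar]

lemma digitChar_eq_three (x : Nat) (hx : x < 10) : Nat.digitChar x = '3' ↔ x = 3 := by
  interval_cases x <;> simp [Nat.digitChar]

lemma toStr_eq_iff (k : Int) (hk : 0 ≤ k) (s : String) (ls : List Char)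
    (hs : s.toList = ls) : PySem.Int.toStr k = s ↔ Nat.toDigits 10 k.toNat = ls := by
  constructor
  · intro h
    have := congrArg String.toList h
    rw [PySem.Int.toList_toStr, hs] at this
    unfold PySem.Int.toChars at this
    rw [if_neg (by omega)] at this
    simpa using this
  · intro h
    apply String.toList_inj.mp
    rw [PySem.Int.toList_toStr, hs]
    unfold PySem.Int.toChars
    rw [if_neg (by omega)]
    simpa using h

lemma toStr_nine (k : Int) (hk : 0 ≤ k) : PySem.Int.toStr k = "9" ↔ k = 9 := by
  rw [toStr_eq_iff k hk "9" ['9'] (by decide)]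
  constructor
  · intro h
    by_cases h10 : k.toNat < 10
    · rw [toDigits_small _ h10] at h
      have := (digitChar_eq_nine _ h10).mp (by simpa using h)
      omega
    · have := toDigitsQ_len2 k.toNat (by omega)
      rw [h] at this; simp at this
  · intro h; subst h; decide

lemma toStr_thirteen (k : Int) (hk : 0 ≤ k) : PySem.Int.toStr k = "13" ↔ k = 13 := by
  rw [toStr_eq_iff k hk "13" ['1', '3'] (by decide)]
  constructor
  · intro h
    by_cases h10 : k.toNat < 10
    · rw [toDigits_small _ h10] at h; simp at h
    · by_cases h100 : k.toNat < 100
      · rw [toDigits_two _ (by omega) h100] at h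
        simp at h
        have h1 := (digitChar_eq_one (k.toNat / 10) (by omega)).mp h.1
        have h3 := (digitChar_eq_three (k.toNat % 10) (by omega)).mp h.2
        omega
      · have := toDigits_len3 k.toNat (by omega)
        rw [h] at this; simp at this
  · intro h; subst h; decide

lemma pvStep_other (d : PySem.Dict String (List String)) (k : Int) (hk : 0 ≤ k)
    (h9 : k ≠ 9) (h13 : k ≠ 13) : pvStep d k = d := by
  unfold pvStep
  have e9 : ¬ PySem.Int.toStr k = "9" := fun h => h9 ((toStr_nine k hk).mp h)
  have e13 : ¬ PySem.Int.toStr k = "13" := fun h => h13 ((toStr_thirteen k hk).mp h)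
  simp [e9, e13]

lemma pvFold_target : ∀ (m : Nat),
    (PySem.List.pyRange 1 ((m : Int) + 1) 1).foldl pvStep PySem.Dict.empty = pvTarget (m : Int) := by
  intro m
  induction m with
  | zero => simp [PySem.List.pyRange_one_eq_nil, pvTarget]
  | succ m ih =>
    have hsplit : PySem.List.pyRange 1 ((m : Int) + 1 + 1) 1 =
        PySem.List.pyRange 1 ((m : Int) + 1) 1 ++ [(m : Int) + 1] :=
      PySem.List.pyRange_one_succ_right (by omega)
    push_cast
    rw [hsplit, List.foldl_append, ih]
    simp only [List.foldl]
    by_cases h9 : (m : Int) + 1 = 9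
    · have hm : m = 8 := by omega
      subst hm; decide
    · by_cases h13 : (m : Int) + 1 = 13
      · have hm : m = 12 := by omega
        subst hm; decide
      · rw [pvStep_other _ _ (by omega) h9 h13]
        unfold pvTarget
        have e9 : (9 ≤ (m : Int) + 1) ↔ (9 ≤ (m : Int)) := by omega
        have e13 : (13 ≤ (m : Int) + 1) ↔ (13 ≤ (m : Int)) := by omega
        simp only [e9, e13]

-- ===== VERDICT (by name: the statement is the Claim_ definition above) =====
theorem config_param_dictionary_spec : Claim_equal_config_param_dictionary := by
  intro n _
  unfold Spec_config_param_dictionary config_param_dictionary config_param_dictionary_alt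
  have hfold : (PySem.List.pyRange 1 (n + 1) 1).foldl pvStep PySem.Dict.empty = pvTarget n := by
    by_cases hn : n ≤ 0
    · rw [PySem.List.pyRange_one_eq_nil (by omega)]
      unfold pvTarget
      rw [if_neg (by omega), if_neg (by omega)]
      rfl
    · have hm : n = ((n.toNat : Int)) := by omega
      rw [hm]
      exact pvFold_target n.toNat
  show ((PySem.List.pyRange 1 (n + 1) 1).foldl pvStep PySem.Dict.empty).items = _
  rw [hfold]
  rfl
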